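-- pv_equiv track=rewrite | github.com/davidjurgens/potato | potato/export/cv_utils.py | _column_major_rle_counts
-- ===== SOURCE A (Python) =====
-- from typing import Dict, List, Tuple, Any, Optional
--
-- def _column_major_rle_counts(mask_2d: List[List[int]], height: int,
--                               width: int) -> List[int]:
--     """
--     Read a 2D mask in column-major order and compute RLE counts.
--
--     Counts alternate between 0-pixels and 1-pixels, starting with 0s.
--
--     Args:
--         mask_2d: 2D list [height][width] of 0/1 values
--         height: Image height
--         width: Image width
--
--     Returns:
--         List of integer run counts in column-major order
--     """
--     counts: List[int] = []
--     current_val = 0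
--     current_run = 0
--
--     for x in range(width):
--         for y in range(height):
--             pixel = mask_2d[y][x]
--             if pixel == current_val:
--                 current_run += 1
--             else:
--                 counts.append(current_run)
--                 current_val = 1 - current_val
--                 current_run = 1
--     counts.append(current_run)
--     return counts
-- ===== SOURCE B (Python) =====
-- from typing import List
--
--
-- def _column_major_rle_counts(mask_2d: List[List[int]], height: int,
--                              width: int) -> List[int]:
--     """Boundary-position RLE: find the column-major indices where the pixel
--     value changes, then take successive differences of those cut positions."""
--     if height <= 0 or width <= 0:
--         return [0]
--     n = height * width
--
--     def pix(i: int) -> int: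
--         return mask_2d[i % height][i // height]
--
--     cuts = [0] + [i for i in range(1, n) if pix(i) != pix(i - 1)] + [n]
--     counts = [b - a for a, b in zip(cuts, cuts[1:])]
--     if pix(0) == 1:
--         counts = [0] + counts
--     return counts
-- ===== Notes on version B (the rewrite author's own statement) =====
-- stated objective: alternative
-- what changed: Replaces A's stateful toggle loop (counts/current_val/current_run updated pixel by pixel) by boundary detection: compute the column-major indices where the pixel value changes (reading pixels by index arithmetic i%height, i//height), sandwich them between 0 and height*width, and return successive differences of these cut positions, with a leading 0 when the first pixel is 1.
-- outside the precondition, e.g. on _column_major_rle_counts([[2, 2]], 1, 2): A returns [0, 1, 1], B returns [2]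
import Mathlib
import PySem

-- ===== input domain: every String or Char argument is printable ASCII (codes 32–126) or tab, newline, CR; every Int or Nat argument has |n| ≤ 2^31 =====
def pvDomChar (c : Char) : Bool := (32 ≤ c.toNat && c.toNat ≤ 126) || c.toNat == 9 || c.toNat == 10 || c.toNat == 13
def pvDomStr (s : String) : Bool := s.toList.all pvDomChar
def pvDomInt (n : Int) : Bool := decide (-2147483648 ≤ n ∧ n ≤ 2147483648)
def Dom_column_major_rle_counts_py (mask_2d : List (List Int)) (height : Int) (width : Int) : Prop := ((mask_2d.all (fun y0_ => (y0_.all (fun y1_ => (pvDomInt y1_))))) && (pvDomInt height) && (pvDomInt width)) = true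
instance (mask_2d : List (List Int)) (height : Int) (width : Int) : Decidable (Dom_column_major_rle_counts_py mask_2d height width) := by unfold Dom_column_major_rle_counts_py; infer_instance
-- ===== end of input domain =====

-- B replaces A's stateful toggle-and-count loop by boundary detection: it collects the
-- column-major indices where the pixel value changes and returns successive differences
-- of those cut positions (objective: alternative); equivalence proved on well-shaped 0/1
-- masks (Pre_ below).

-- ===== PORT A =====
-- literal port of A's nested loop; state = (counts, current_val, current_run);
-- the pixel read mask_2d[y][x] uses pyGetD (in-range under Pre_, where Python does not raise)
def column_major_rle_counts_py (mask_2d : List (List Int)) (height : Int) (width : Int) : List Int :=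
  let st := (PySem.List.pyRange 0 width 1).foldl (fun st x =>
    (PySem.List.pyRange 0 height 1).foldl (fun st y =>
      let pixel := PySem.List.pyGetD (PySem.List.pyGetD mask_2d y []) x 0
      if pixel = st.2.1 then (st.1, st.2.1, st.2.2 + 1)
      else (st.1 ++ [st.2.2], 1 - st.2.1, 1)) st) (([] : List Int), (0 : Int), (0 : Int))
  st.1 ++ [st.2.2]

-- ===== PORT B =====
-- Source B's helper pix(i): the i-th pixel in column-major order, read by index arithmetic
-- (mask_2d[i % height][i // height], with PySem floor division/modulus)
def pvPix (mask_2d : List (List Int)) (height : Int) (i : Int) : Int :=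
  PySem.List.pyGetD (PySem.List.pyGetD mask_2d (PySem.Int.mod i height) []) (PySem.Int.floordiv i height) 0

def column_major_rle_counts_py_alt (mask_2d : List (List Int)) (height : Int) (width : Int) : List Int :=
  if height ≤ 0 ∨ width ≤ 0 then [0]
  else
    let n := height * width
    let cuts := 0 :: ((PySem.List.pyRange 1 n 1).filter
      (fun i => decide (pvPix mask_2d height i ≠ pvPix mask_2d height (i - 1)))) ++ [n]
    let counts := (cuts.zip (cuts.drop 1)).map (fun p => p.2 - p.1)
    if pvPix mask_2d height 0 = 1 then 0 :: counts else counts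

-- ===== PRECONDITION & SPEC =====
-- Pre_ restricts to the function's documented domain: a well-shaped [height][width] region
-- (outside it A raises IndexError) whose entries are 0/1 as the docstring states; on malformed
-- masks with other values A's toggle logic splits equal runs, an artefact B does not reproduce.
def Pre_column_major_rle_counts_py (mask_2d : List (List Int)) (height : Int) (width : Int) : Prop :=
  height.toNat ≤ mask_2d.length ∧
  ∀ row ∈ mask_2d.take height.toNat,
    width.toNat ≤ row.length ∧ ∀ p ∈ row.take width.toNat, p = 0 ∨ p = 1
instance (mask_2d : List (List Int)) (height : Int) (width : Int) : Decidable (Pre_column_major_rle_counts_py mask_2d height width) := by unfold Pre_column_major_rle_counts_py; infer_instance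

def pvWitness_column_major_rle_counts_py : List (List Int) × Int × Int := ([[0, 1], [1, 1]], 2, 2)

def Spec_column_major_rle_counts_py (mask_2d : List (List Int)) (height : Int) (width : Int) (out : List Int) : Prop := out = column_major_rle_counts_py_alt mask_2d height width
instance (mask_2d : List (List Int)) (height : Int) (width : Int) (out : List Int) : Decidable (Spec_column_major_rle_counts_py mask_2d height width out) := by unfold Spec_column_major_rle_counts_py; infer_instance

-- ===== CLAIM (what is proved, stated in full; the proofs are below) =====
def Claim_equal_column_major_rle_counts_py : Prop := ∀ (mask_2d : List (List Int)) (height : Int) (width : Int), Dom_column_major_rle_counts_py mask_2d height width → Pre_column_major_rle_counts_py mask_2d height width → Spec_column_major_rle_counts_py mask_2d height width (column_major_rle_counts_py mask_2d height width)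

-- ===== LEMMAS AND PROOFS =====

-- the column-major flattening both programs implicitly traverse (proof-side object)
def pvFlat (mask_2d : List (List Int)) (height : Int) (width : Int) : List Int :=
  (PySem.List.pyRange 0 width 1).flatMap (fun x =>
    (PySem.List.pyRange 0 height 1).map (fun y =>
      PySem.List.pyGetD (PySem.List.pyGetD mask_2d y []) x 0))

-- A's per-pixel step, and the RLE it produces from a given (value, run) state
def pvStepA (st : List Int × Int × Int) (p : Int) : List Int × Int × Int :=
  if p = st.2.1 then (st.1, st.2.1, st.2.2 + 1)
  else (st.1 ++ [st.2.2], 1 - st.2.1, 1)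

def pvGA (v r : Int) : List Int → List Int
  | [] => [r]
  | p :: t => if p = v then pvGA v (r + 1) t else r :: pvGA (1 - v) 1 t

-- run-length grouping (proof-side description of the runs)
def pvGrp (v r : Int) : List Int → List (Int × Int)
  | [] => [(v, r)]
  | p :: t => if p = v then pvGrp v (r + 1) t else (v, r) :: pvGrp p 1 t

-- B's cut positions, as Nat indices into the flat list (index k stands for cut position k+1)
def pvNatCuts (l : List Int) : List Nat :=
  (List.range (l.length - 1)).filter (fun k => decide (l.getD (k + 1) 0 ≠ l.getD k 0))

theorem pvFoldA (l : List Int) : ∀ (c : List Int) (v r : Int),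
    (l.foldl pvStepA (c, v, r)).1 ++ [(l.foldl pvStepA (c, v, r)).2.2] = c ++ pvGA v r l := by
  induction l with
  | nil => intro c v r; simp [pvGA]
  | cons p t ih =>
    intro c v r
    by_cases h : p = v <;> simp [pvStepA, pvGA, h, ih, List.append_assoc]

theorem pvGA_eq_grp (l : List Int) : ∀ (v r : Int), (∀ p ∈ l, p = 0 ∨ p = 1) → (v = 0 ∨ v = 1) →
    pvGA v r l = (pvGrp v r l).map (·.2) := by
  induction l with
  | nil => intro v r _ _; simp [pvGA, pvGrp]
  | cons p t ih =>
    intro v r hbin hv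
    have hp : p = 0 ∨ p = 1 := hbin p (by simp)
    have ht : ∀ q ∈ t, q = 0 ∨ q = 1 := fun q hq => hbin q (by simp [hq])
    by_cases h : p = v
    · simp only [pvGA, pvGrp, if_pos h]
      exact ih v (r + 1) ht hv
    · have hpv : 1 - v = p := by omega
      simp only [pvGA, pvGrp, if_neg h, hpv, List.map_cons]
      exact congrArg (r :: ·) (ih p 1 ht hp)

theorem pvGrp_head (l : List Int) : ∀ (v r : Int), ∃ n rest, pvGrp v r l = (v, n) :: rest := by
  induction l with
  | nil => intro v r; exact ⟨r, [], rfl⟩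
  | cons p t ih =>
    intro v r
    by_cases h : p = v
    · simpa [pvGrp, h] using ih v (r + 1)
    · exact ⟨r, pvGrp p 1 t, by simp [pvGrp, h]⟩

theorem pvGrp_succ (l : List Int) : ∀ (v r n : Int) (rest : List (Int × Int)),
    pvGrp v r l = (v, n) :: rest → pvGrp v (r + 1) l = (v, n + 1) :: rest := by
  induction l with
  | nil =>
    intro v r n rest h
    simp only [pvGrp] at h ⊢
    injection h with h1 h2
    injection h1 with h1a h1b
    subst h1b; subst h2
    rfl
  | cons p t ih =>
    intro v r n rest h
    by_cases hp : p = v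
    · simp only [pvGrp, if_pos hp] at h ⊢
      exact ih v (r + 1) n rest h
    · simp only [pvGrp, if_neg hp] at h ⊢
      injection h with h1 h2
      injection h1 with h1a h1b
      rw [h1b, h2]

-- A's nested fold is the single fold of pvStepA over the column-major flattening
theorem pvA_eq_fold_flat (mask_2d : List (List Int)) (height width : Int) :
    column_major_rle_counts_py mask_2d height width =
    ((pvFlat mask_2d height width).foldl pvStepA ([], 0, 0)).1 ++
      [((pvFlat mask_2d height width).foldl pvStepA ([], 0, 0)).2.2] := by
  simp [column_major_rle_counts_py, pvFlat, List.foldl_flatMap, List.foldl_map, pvStepA]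

-- under Pre_, every pixel of the flattening is 0 or 1
theorem pvFlat_binary (mask_2d : List (List Int)) (height width : Int)
    (hpre : Pre_column_major_rle_counts_py mask_2d height width) :
    ∀ p ∈ pvFlat mask_2d height width, p = 0 ∨ p = 1 := by
  obtain ⟨hlen, hrows⟩ := hpre
  intro p hp
  simp only [pvFlat, List.mem_flatMap, List.mem_map] at hp
  obtain ⟨x, hx, y, hy, rfl⟩ := hp
  rw [PySem.List.mem_pyRange_one] at hx hy
  have hyn : y.toNat < height.toNat := by omega
  have hylen : y.toNat < mask_2d.length := lt_of_lt_of_le hyn hlen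
  have hrow : PySem.List.pyGetD mask_2d y [] = mask_2d[y.toNat] :=
    PySem.List.pyGetD_eq_getElem mask_2d [] hy.1 (by omega)
  have hmem : mask_2d[y.toNat] ∈ mask_2d.take height.toNat := by
    have : (mask_2d.take height.toNat)[y.toNat]'(by simp; omega) = mask_2d[y.toNat] :=
      List.getElem_take
    exact this ▸ List.getElem_mem _
  obtain ⟨hwlen, hbin⟩ := hrows _ hmem
  have hxn : x.toNat < width.toNat := by omega
  have hxlen : x.toNat < (mask_2d[y.toNat]).length := lt_of_lt_of_le hxn hwlen
  have hpix : PySem.List.pyGetD mask_2d[y.toNat] x 0 = mask_2d[y.toNat][x.toNat] :=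
    PySem.List.pyGetD_eq_getElem mask_2d[y.toNat] 0 hx.1 (by omega)
  rw [hrow, hpix]
  refine hbin _ ?_
  have : (mask_2d[y.toNat].take width.toNat)[x.toNat]'(by simp; omega) =
      mask_2d[y.toNat][x.toNat] := List.getElem_take
  exact this ▸ List.getElem_mem _

-- length of a range-flatMap-of-range-maps grid
theorem pvGridLen {α : Type} (g : Nat → Nat → α) (wn hn : Nat) :
    ((List.range wn).flatMap (fun x => (List.range hn).map (g x))).length = wn * hn := by
  induction wn with
  | zero => simp
  | succ w ih =>
    rw [List.range_succ, List.flatMap_append]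
    simp [ih, Nat.succ_mul]

-- indexing the grid flattening: element i is g (i / hn) (i % hn)
theorem pvGridGet {α : Type} (g : Nat → Nat → α) (wn hn : Nat) (i : Nat) (hi : i < wn * hn) :
    ((List.range wn).flatMap (fun x => (List.range hn).map (g x)))[i]? =
      some (g (i / hn) (i % hn)) := by
  induction wn with
  | zero => omega
  | succ w ih =>
    rw [List.range_succ, List.flatMap_append]
    by_cases h : i < w * hn
    · rw [List.getElem?_append_left (by rw [pvGridLen]; exact h)]
      exact ih h
    · have hn0 : hn ≠ 0 := by rintro rfl; simp at hi
      have hi' : i < w * hn + hn := by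
        have := hi; rw [Nat.succ_mul] at this; exact this
      have hj : i - w * hn < hn := by omega
      rw [List.getElem?_append_right (by rw [pvGridLen]; omega)]
      rw [pvGridLen]
      have hdiv : i / hn = w := Nat.div_eq_of_lt_le (by omega) (by rw [Nat.succ_mul]; omega)
      have hmod : i % hn = i - w * hn := by
        conv_lhs => rw [show i = hn * w + (i - w * hn) by rw [Nat.mul_comm]; omega]
        rw [Nat.mul_add_mod, Nat.mod_eq_of_lt hj]
      rw [List.flatMap_cons, List.flatMap_nil, List.append_nil, List.getElem?_map]
      simp [List.getElem?_range hj, hdiv, hmod]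

-- the flat list in grid form
theorem pvFlat_grid (mask_2d : List (List Int)) (height width : Int) :
    pvFlat mask_2d height width =
    (List.range width.toNat).flatMap (fun (x : Nat) => (List.range height.toNat).map
      (fun (y : Nat) => PySem.List.pyGetD (PySem.List.pyGetD mask_2d (y : Int) []) (x : Int) 0)) := by
  unfold pvFlat
  rw [PySem.List.pyRange_one 0 width, PySem.List.pyRange_one 0 height]
  simp only [Int.sub_zero, List.flatMap_map, List.map_map, Function.comp_def, zero_add]

theorem pvFlat_length (mask_2d : List (List Int)) (height width : Int) :
    (pvFlat mask_2d height width).length = width.toNat * height.toNat := by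
  rw [pvFlat_grid]; exact pvGridLen _ _ _

-- pix(i) of Source B reads exactly element i of the flat list
theorem pvPix_flat (mask_2d : List (List Int)) (height width : Int)
    (hh : 0 < height) (hw : 0 < width) (i : Int) (h0 : 0 ≤ i) (hi : i < height * width) :
    pvPix mask_2d height i = (pvFlat mask_2d height width).getD i.toNat 0 := by
  have hmul : (height * width).toNat = height.toNat * width.toNat :=
    Int.toNat_mul (by omega) (by omega)
  have hm : i.toNat < width.toNat * height.toNat := by
    rw [Nat.mul_comm]; omega
  rw [pvFlat_grid, List.getD_eq_getElem?_getD,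
    pvGridGet (fun (x : Nat) (y : Nat) =>
      PySem.List.pyGetD (PySem.List.pyGetD mask_2d (y : Int) []) (x : Int) 0)
      width.toNat height.toNat i.toNat hm]
  have hi' : i = ((i.toNat : Nat) : Int) := (Int.toNat_of_nonneg h0).symm
  have hh' : height = ((height.toNat : Nat) : Int) := (Int.toNat_of_nonneg (by omega)).symm
  unfold pvPix
  rw [hi', hh', PySem.Int.mod_natCast, PySem.Int.floordiv_natCast]
  simp

-- shift a scanl of sums by a constant
theorem pvScanlShift (rs : List Int) : ∀ (a c : Int),
    (List.scanl (· + ·) a rs).map (· + c) = List.scanl (· + ·) (a + c) rs := by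
  induction rs with
  | nil => intro a c; simp
  | cons r rs ih =>
    intro a c
    rw [List.scanl_cons, List.scanl_cons, List.map_cons, ih]
    ring_nf

-- successive differences of a scanl of sums give back the summand list
theorem pvScanlDiff (rs : List Int) : ∀ (a : Int),
    (List.zip (List.scanl (· + ·) a rs) ((List.scanl (· + ·) a rs).drop 1)).map
      (fun p => p.2 - p.1) = rs := by
  induction rs with
  | nil => intro a; simp
  | cons r rs ih =>
    intro a
    cases rs with
    | nil => simp
    | cons r2 rs2 =>
      have h := ih (a + r)
      simp only [List.scanl_cons, List.drop_succ_cons, List.drop_zero] at h ⊢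
      rw [List.zip_cons_cons, List.map_cons, h, add_sub_cancel_left]

-- recursion for B's cut positions
theorem pvNatCuts_cons (p q : Int) (t : List Int) :
    pvNatCuts (p :: q :: t) =
      (if q ≠ p then [0] else []) ++ (pvNatCuts (q :: t)).map (· + 1) := by
  simp only [pvNatCuts, List.length_cons, Nat.add_sub_cancel, List.range_succ_eq_map,
    List.filter_cons, List.filter_map]
  by_cases h : q = p <;>
    simp [h, Function.comp_def, Nat.succ_eq_add_one] <;>
    exact List.map_congr_left (fun a _ => rfl)

-- the combinatorial heart: cut positions with endpoints 0 and n are exactly the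
-- partial sums of the run lengths
theorem pvCuts_scanl (t : List Int) : ∀ (p : Int),
    (0 : Int) :: (pvNatCuts (p :: t)).map (fun (k : Nat) => (k : Int) + 1) ++
      [((p :: t).length : Int)] =
    List.scanl (· + ·) 0 ((pvGrp p 1 t).map (·.2)) := by
  induction t with
  | nil =>
    intro p
    simp [pvNatCuts, pvGrp, List.scanl_cons, List.scanl_nil]
  | cons q t ih =>
    intro p
    obtain ⟨n1, rest, hgrp⟩ := pvGrp_head t q 1
    have hih := ih q
    rw [hgrp, List.map_cons, List.scanl_cons, List.cons_append] at hih
    have htail : (pvNatCuts (q :: t)).map (fun (k : Nat) => (k : Int) + 1) ++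
        [((q :: t).length : Int)] = List.scanl (· + ·) (0 + n1) (rest.map (·.2)) := by
      injection hih
    have hshift := congrArg (List.map (· + (1 : Int))) htail
    rw [pvScanlShift, List.map_append, List.map_map] at hshift
    have hcore : ((pvNatCuts (q :: t)).map (· + 1)).map (fun (k : Nat) => (k : Int) + 1) ++
        [((p :: q :: t).length : Int)] = List.scanl (· + ·) (0 + n1 + 1) (rest.map (·.2)) := by
      rw [← hshift, List.map_map]
      congr 1
    rw [pvNatCuts_cons]
    by_cases h : q = p
    · subst h
      rw [if_neg (by simp), List.nil_append]
      have hrw : pvGrp q 1 (q :: t) = (q, n1 + 1) :: rest := by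
        show (if q = q then pvGrp q (1 + 1) t else (q, 1) :: pvGrp q 1 t) = _
        rw [if_pos rfl]
        exact pvGrp_succ t q 1 n1 rest hgrp
      rw [hrw, List.map_cons, List.scanl_cons, List.cons_append]
      rw [show ((0 : Int) + ((q, n1 + 1) : Int × Int).2) = 0 + n1 + 1 by show (0 : Int) + (n1 + 1) = 0 + n1 + 1; ring]
      exact congrArg (List.cons 0) hcore
    · rw [if_pos h]
      have hrw : pvGrp p 1 (q :: t) = (p, 1) :: (q, n1) :: rest := by
        simp [pvGrp, h, hgrp]
      rw [hrw, List.map_cons, List.map_cons, List.scanl_cons, List.scanl_cons]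
      simp only [List.cons_append, List.map_cons]
      refine congrArg (List.cons 0) ?_
      refine congrArg₂ List.cons (by norm_num) ?_
      rw [show (0 : Int) + 1 + n1 = 0 + n1 + 1 by ring]
      exact hcore

-- ===== VERDICT (by name: the statement is the Claim_ definition above) =====
theorem column_major_rle_counts_py_spec : Claim_equal_column_major_rle_counts_py := by
  intro mask_2d height width _ hpre
  unfold Spec_column_major_rle_counts_py
  rw [pvA_eq_fold_flat]
  have hfold := pvFoldA (pvFlat mask_2d height width) [] 0 0
  simp only [List.nil_append] at hfold
  rw [hfold]
  simp only [column_major_rle_counts_py_alt]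
  by_cases hpos : height ≤ 0 ∨ width ≤ 0
  · rw [if_pos hpos]
    have hflat : pvFlat mask_2d height width = [] := by
      rcases hpos with hh | hw
      · simp [pvFlat, PySem.List.pyRange_one_eq_nil (by omega : height ≤ 0)]
      · simp [pvFlat, PySem.List.pyRange_one_eq_nil (by omega : width ≤ 0)]
    rw [hflat]
    simp [pvGA]
  · rw [if_neg hpos]
    have hh : 0 < height := by omega
    have hw : 0 < width := by
      by_contra hc
      exact hpos (Or.inr (by omega))
    have hbin := pvFlat_binary mask_2d height width hpre
    have hlen : (pvFlat mask_2d height width).length = width.toNat * height.toNat :=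
      pvFlat_length mask_2d height width
    have hpix : ∀ i : Int, 0 ≤ i → i < height * width →
        pvPix mask_2d height i = (pvFlat mask_2d height width).getD i.toNat 0 :=
      fun i h0 hi => pvPix_flat mask_2d height width hh hw i h0 hi
    set l := pvFlat mask_2d height width with hl
    clear_value l
    have hmul : (height * width).toNat = height.toNat * width.toNat :=
      Int.toNat_mul (by omega) (by omega)
    have hN : height * width = (l.length : Int) := by
      rw [hlen]; push_cast
      rw [Int.toNat_of_nonneg (by omega), Int.toNat_of_nonneg (by omega)]
      ring
    have hmulpos : 0 < height * width := mul_pos hh hw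
    have hlpos : 0 < l.length := by omega
    -- rewrite B's filtered range into pvNatCuts
    have hcuts : (PySem.List.pyRange 1 (height * width) 1).filter
        (fun i => decide (pvPix mask_2d height i ≠ pvPix mask_2d height (i - 1))) =
        (pvNatCuts l).map (fun (k : Nat) => (k : Int) + 1) := by
      rw [PySem.List.pyRange_one, List.filter_map]
      have hNN : ((height * width) - 1).toNat = l.length - 1 := by omega
      rw [hNN]
      unfold pvNatCuts
      rw [List.filter_congr
        (p := (fun i => decide (pvPix mask_2d height i ≠ pvPix mask_2d height (i - 1))) ∘
          (fun k : Nat => (1 : Int) + k))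
        (q := fun k => decide (l.getD (k + 1) 0 ≠ l.getD k 0)) ?_]
      · exact List.map_congr_left (fun k _ => by ring)
      · intro k hk
        rw [List.mem_range] at hk
        have hk1 : (0 : Int) ≤ 1 + (k : Int) := by omega
        have hk2 : (1 : Int) + k < height * width := by omega
        have e1 : pvPix mask_2d height (1 + (k : Int)) = l.getD (k + 1) 0 := by
          rw [hpix _ hk1 hk2]
          congr 1
          omega
        have e2 : pvPix mask_2d height ((1 + (k : Int)) - 1) = l.getD k 0 := by
          have he : (1 + (k : Int)) - 1 = (k : Int) := by ring
          rw [he, hpix _ (by omega) (by omega)]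
          congr 1
        simp only [Function.comp_apply, e1, e2]
    rw [hcuts]
    -- the flat list is nonempty: expose its head and substitute
    obtain ⟨p, t, hpt⟩ : ∃ p t, l = p :: t := by
      cases hlt : l with
      | nil => rw [hlt] at hlpos; simp at hlpos
      | cons p t => exact ⟨p, t, rfl⟩
    subst hpt
    have hhead : pvPix mask_2d height 0 = p := by
      rw [hpix 0 le_rfl hmulpos]
      simp
    rw [hhead, hN]
    -- cuts with endpoints = scanl of run lengths; diffs give the run lengths back
    have hscan := pvCuts_scanl t p
    have hcounts :
        (((0 : Int) :: (pvNatCuts (p :: t)).map (fun (k : Nat) => (k : Int) + 1) ++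
            [(((p :: t).length : Nat) : Int)]).zip
          (((0 : Int) :: (pvNatCuts (p :: t)).map (fun (k : Nat) => (k : Int) + 1) ++
            [(((p :: t).length : Nat) : Int)]).drop 1)).map
          (fun pr => pr.2 - pr.1) = (pvGrp p 1 t).map (·.2) := by
      rw [hscan]
      exact pvScanlDiff _ 0
    rw [hcounts]
    -- A's side: pvGA on a binary list is the run lengths, 0-prefixed when it starts with 1
    have hpbin : p = 0 ∨ p = 1 := hbin p (by simp)
    have htbin : ∀ q ∈ t, q = 0 ∨ q = 1 := fun q hq => hbin q (by simp [hq])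
    rcases hpbin with hp | hp
    · subst hp
      have h1 : pvGA 0 0 (0 :: t) = pvGA 0 1 t := by simp [pvGA]
      rw [h1, pvGA_eq_grp t 0 1 htbin (Or.inl rfl)]
      simp
    · subst hp
      have h1 : pvGA 0 0 (1 :: t) = 0 :: pvGA 1 1 t := by norm_num [pvGA]
      rw [h1, pvGA_eq_grp t 1 1 htbin (Or.inr rfl)]
      simp
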